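-- pv_equiv track=rewrite | github.com/tomulanovski/gene2net | scripts/fix_substrings.py | find_substring_problems
-- ===== SOURCE A (Python) =====
-- def find_substring_problems(labels):
--     """Find labels that are substrings of other labels."""
--     problematic = {}  # {short_label: [longer_labels_containing_it]}
--
--     # Sort by length to check shorter labels first
--     sorted_labels = sorted(labels, key=len)
--
--     for i, short_label in enumerate(sorted_labels):
--         containing_labels = []
--         for j in range(i + 1, len(sorted_labels)):
--             long_label = sorted_labels[j]
--             if short_label in long_label and short_label != long_label:
--                 containing_labels.append(long_label)
--
--         if containing_labels:
--             problematic[short_label] = containing_labels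
--
--     return problematic
-- ===== SOURCE B (Python) =====
-- def find_substring_problems(labels):
--     """Find labels that are substrings of other labels."""
--     ordered = sorted(labels, key=len)
--
--     # Index every proper substring of every label: substring -> list of the
--     # labels (in length-sorted order) that contain it.  This replaces the
--     # pairwise label-vs-label scan with one lookup per label.
--     index = {}
--     for t in ordered:
--         n = len(t)
--         subs = {t[i:j] for i in range(n + 1) for j in range(i, n + 1) if j - i < n}
--         for sub in subs:
--             index[sub] = index.get(sub, []) + [t]
--
--     # A label is problematic iff it occurs in the index; its containers are
--     # exactly the indexed list (already in the right order).
--     problematic = {}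
--     for s in ordered:
--         if s in index and s not in problematic:
--             problematic[s] = index[s]
--     return problematic
-- ===== Notes on version B (the rewrite author's own statement) =====
-- stated objective: faster
-- what changed: Replaces A's quadratic pairwise label-vs-label scan with a substring hash index: one pass enumerates every proper substring of each length-sorted label into a dict substring->containers, then each label is answered by a single dict lookup instead of scanning all remaining labels.
import Mathlib
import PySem

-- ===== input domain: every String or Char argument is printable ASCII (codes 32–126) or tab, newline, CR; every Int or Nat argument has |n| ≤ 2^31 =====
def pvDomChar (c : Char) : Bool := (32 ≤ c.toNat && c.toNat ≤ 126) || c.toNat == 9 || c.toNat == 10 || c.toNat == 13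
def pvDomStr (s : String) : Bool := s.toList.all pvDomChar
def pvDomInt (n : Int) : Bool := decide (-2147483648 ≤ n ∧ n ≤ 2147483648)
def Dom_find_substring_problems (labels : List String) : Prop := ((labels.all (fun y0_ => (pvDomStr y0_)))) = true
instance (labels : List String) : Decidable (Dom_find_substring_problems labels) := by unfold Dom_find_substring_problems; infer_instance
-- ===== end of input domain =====

-- B replaces A's pairwise label-vs-label scan with a substring hash index: each label's
-- proper substrings are indexed once, then every label is answered by one dict lookup
-- (objective: faster; measurably so on the generated timing inputs).


-- ===== PORT A =====
def find_substring_problems (labels : List String) : List (String × List String) :=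
  let sortedLabels := PySem.List.sorted labels (fun l => PySem.Str.len l) false
  let problematic :=
    (PySem.List.enumerate sortedLabels).foldl
      (fun (d : PySem.Dict String (List String)) p =>
        let i := p.1
        let shortLabel := p.2
        let containingLabels :=
          (PySem.List.pyRange (i + 1) (PySem.List.len sortedLabels) 1).foldl
            (fun (acc : List String) j =>
              let longLabel := PySem.List.pyGetD sortedLabels j ""
              if PySem.Str.isIn shortLabel longLabel && shortLabel != longLabel then
                acc ++ [longLabel]
              else acc) []
        if containingLabels ≠ [] then d.insert shortLabel containingLabels else d)
      PySem.Dict.empty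
  problematic.items

-- ===== PORT B =====
-- the set comprehension {t[i:j] for i in range(n+1) for j in range(i, n+1) if j-i < n}
def properSubs (t : String) : List String :=
  (PySem.List.pyRange 0 (PySem.Str.len t + 1) 1).flatMap (fun i =>
    ((PySem.List.pyRange i (PySem.Str.len t + 1) 1).filter
        (fun j => decide (j - i < PySem.Str.len t))).map
      (fun j => PySem.Str.slice t (some i) (some j)))

def find_substring_problems_alt (labels : List String) : List (String × List String) :=
  let ordered := PySem.List.sorted labels (fun l => PySem.Str.len l) false
  let index :=
    ordered.foldl
      (fun (d : PySem.Dict String (List String)) t =>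
        let subs : PySem.Set String := PySem.Set.ofList (properSubs t)
        subs.foldl (fun d sub => d.modify sub [] (fun v => v ++ [t])) d)
      PySem.Dict.empty
  (ordered.foldl
      (fun (r : PySem.Dict String (List String)) s =>
        if index.contains s && !r.contains s then r.insert s (index.getD s []) else r)
      PySem.Dict.empty).items

-- ===== PRECONDITION & SPEC =====
def Spec_find_substring_problems (labels : List String) (out : List (String × List String)) : Prop := out = find_substring_problems_alt labels
instance (labels : List String) (out : List (String × List String)) : Decidable (Spec_find_substring_problems labels out) := by unfold Spec_find_substring_problems; infer_instance

-- ===== CLAIM (what is proved, stated in full; the proofs are below) =====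
def Claim_equal_find_substring_problems : Prop := ∀ (labels : List String), Dom_find_substring_problems labels → Spec_find_substring_problems labels (find_substring_problems labels)

-- ===== LEMMAS AND PROOFS =====

-- A's test "s in t and s != t" …
def pLbl (s t : String) : Bool := PySem.Str.isIn s t && s != t
-- … equals "len(s) < len(t) and s in t" (a substring of equal length is the string itself)
def qLbl (s t : String) : Bool := decide (PySem.Str.len s < PySem.Str.len t) && PySem.Str.isIn s t

-- the canonical form both ports are reduced to (L is the length-sorted list)
def canonD (L : List String) : PySem.Dict String (List String) :=
  L.foldl (fun d s => if L.any (qLbl s) then d.insert s (L.filter (qLbl s)) else d)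
    PySem.Dict.empty

-- B's index-building loop body, named
def bStep (d : PySem.Dict String (List String)) (t : String) : PySem.Dict String (List String) :=
  (PySem.Set.ofList (properSubs t)).foldl (fun d sub => d.modify sub [] (fun v => v ++ [t])) d

theorem pLbl_eq_qLbl : pLbl = qLbl := by
  funext s t
  unfold pLbl qLbl
  cases h : PySem.Str.isIn s t
  · simp
  · simp only [Bool.and_true, Bool.true_and]
    have hinf : s.toList <:+: t.toList := (PySem.Str.isIn_iff_infix s t).mp h
    have hle : s.toList.length ≤ t.toList.length := hinf.length_le
    by_cases he : s = t
    · subst he; simp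
    · have hlt : s.toList.length < t.toList.length := by
        rcases lt_or_eq_of_le hle with h' | h'
        · exact h'
        · exact absurd (String.toList_inj.mp (hinf.eq_of_length h')) he
      have hl2 : s.length < t.length := by simpa using hlt
      simp [he, hl2]

theorem filter_drop_eq_filter' (S : List String)
    (hp : S.Pairwise (fun a b => PySem.Str.len a ≤ PySem.Str.len b))
    (k : Nat) (hk : k < S.length) :
    (S.drop (k+1)).filter (pLbl S[k]) = S.filter (qLbl S[k]) := by
  rw [pLbl_eq_qLbl]
  have hsplit : S.filter (qLbl S[k])
      = (S.take (k+1)).filter (qLbl S[k]) ++ (S.drop (k+1)).filter (qLbl S[k]) := by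
    rw [← List.filter_append, List.take_append_drop]
  have htake : (S.take (k+1)).filter (qLbl S[k]) = [] := by
    rw [List.filter_eq_nil_iff]
    intro t ht
    obtain ⟨j, hj, hjt⟩ := List.mem_iff_getElem.mp ht
    have hjlen : j < k + 1 := by
      simp [List.length_take] at hj; omega
    have hjS : j < S.length := by omega
    have hget : t = S[j] := by
      rw [← hjt]; simp
    subst hget
    have hle : PySem.Str.len S[j] ≤ PySem.Str.len S[k] := by
      rcases Nat.lt_or_ge j k with hlt | hge
      · exact List.pairwise_iff_getElem.mp hp j k hjS hk hlt
      · have : j = k := by omega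
        subst this; exact le_refl _
    have hle' : S[j].length ≤ S[k].length := by
      simp only [PySem.Str.len_eq] at hle
      exact_mod_cast (by simpa using hle)
    simp [qLbl]
    intro h
    exact absurd h (by omega)
  rw [hsplit, htake, List.nil_append]

theorem ite_filter_ne_any {α β : Type} (l : List α) (f : α → Bool) (a b : β) :
    (if l.filter f ≠ [] then a else b) = (if l.any f then a else b) := by
  by_cases h : l.filter f = []
  · rw [if_neg (by simp [h]), if_neg]
    simp only [List.any_eq_true]
    rw [List.filter_eq_nil_iff] at h
    rintro ⟨x, hx, hfx⟩; exact (h x hx) hfx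
  · rw [if_pos h, if_pos]
    simp only [List.any_eq_true]
    obtain ⟨x, hx⟩ := List.exists_mem_of_ne_nil _ h
    have hm := List.mem_filter.mp hx
    exact ⟨x, hm.1, hm.2⟩

theorem A_eq_canon (labels : List String) :
    find_substring_problems labels
      = (canonD (PySem.List.sorted labels (fun l => PySem.Str.len l) false)).items := by
  unfold find_substring_problems canonD
  dsimp only
  set S := PySem.List.sorted labels (fun l => PySem.Str.len l) false with hS
  congr 1
  have hp := PySem.List.sorted_pairwise labels (fun l => PySem.Str.len l)
  rw [← hS] at hp
  rw [PySem.List.foldl_congr_mem (g := fun (d : PySem.Dict String (List String)) p =>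
        if S.any (qLbl p.2) then d.insert p.2 (S.filter (qLbl p.2)) else d)]
  · rw [show List.foldl (fun (d : PySem.Dict String (List String)) s =>
          if S.any (qLbl s) then d.insert s (S.filter (qLbl s)) else d) PySem.Dict.empty S
        = List.foldl (fun (d : PySem.Dict String (List String)) s =>
          if S.any (qLbl s) then d.insert s (S.filter (qLbl s)) else d) PySem.Dict.empty
          ((PySem.List.enumerate S 0).map (fun p => p.2)) from by
        rw [PySem.List.map_snd_enumerate]]
    rw [List.foldl_map]
  · intro acc p hmem
    obtain ⟨k, hk, rfl⟩ := (PySem.List.mem_enumerate_iff _ _ _).mp hmem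
    dsimp only
    rw [show (0 : Int) + (k : Int) + 1 = ((k:Int)+1) by ring]
    rw [PySem.List.foldl_pyRange_pyGetD S ""
          (fun (acc : List String) t =>
            if PySem.Str.isIn S[k] t && S[k] != t then acc ++ [t] else acc)
          [] (by omega : (0:Int) ≤ (k:Int)+1)]
    rw [show ((k:Int)+1).toNat = k + 1 by omega]
    rw [PySem.List.foldl_append_if_eq_filter]
    rw [List.nil_append]
    rw [show (fun t => PySem.Str.isIn S[k] t && S[k] != t) = pLbl S[k] from rfl]
    rw [filter_drop_eq_filter' S hp k hk]
    rw [ite_filter_ne_any]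

-- membership in the proper-substring comprehension is exactly qLbl
theorem mem_properSubs (x t : String) : x ∈ properSubs t ↔ qLbl x t = true := by
  unfold properSubs qLbl
  simp only [List.mem_flatMap, List.mem_map, List.mem_filter, PySem.List.mem_pyRange_one,
    decide_eq_true_eq, PySem.Str.len_eq, Bool.and_eq_true]
  constructor
  · rintro ⟨i, ⟨hi0, hin⟩, j, ⟨⟨hij, hjn⟩, hlt⟩, rfl⟩
    have h0j : (0:Int) ≤ j := le_trans hi0 hij
    have htl : (PySem.Str.slice t (some i) (some j)).toList
        = List.take (j.toNat - i.toNat) (List.drop i.toNat t.toList) := by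
      rw [PySem.Str.toList_slice, PySem.Chars.slice_eq_listSlice,
        PySem.List.slice_toNat _ hi0 h0j]
    have hinf : (PySem.Str.slice t (some i) (some j)).toList <:+: t.toList := by
      rw [htl]
      exact ((List.take_prefix _ _).isInfix).trans ((List.drop_suffix _ _).isInfix)
    constructor
    · have hlen : (PySem.Str.slice t (some i) (some j)).toList.length
          ≤ j.toNat - i.toNat := by
        rw [htl]; exact List.length_take_le _ _
      omega
    · exact (PySem.Str.isIn_iff_infix _ t).mpr hinf
  · rintro ⟨hlt, hin⟩
    obtain ⟨p, s, hsplit⟩ := (PySem.Str.isIn_iff_infix x t).mp hin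
    have hlen : p.length + x.toList.length + s.length = t.toList.length := by
      rw [← hsplit]; simp [Nat.add_assoc]
    have hxlen : x.toList.length < t.toList.length := by exact_mod_cast hlt
    refine ⟨(p.length : Int), ⟨by positivity, by omega⟩,
      (p.length : Int) + (x.toList.length : Int), ⟨⟨by omega, by omega⟩,
        by omega⟩, ?_⟩
    apply String.toList_inj.mp
    rw [PySem.Str.toList_slice, PySem.Chars.slice_eq_listSlice]
    rw [show (p.length : Int) + (x.toList.length : Int)
        = ((p.length + x.toList.length : Nat) : Int) by push_cast; ring]
    rw [PySem.List.slice_natCast]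
    rw [← hsplit, show p ++ x.toList ++ s = p ++ (x.toList ++ s) by simp]
    rw [List.drop_left, show p.length + x.toList.length - p.length = x.toList.length by omega,
      List.take_left]

-- one modify-loop over a Nodup batch, lookup afterwards
theorem inner_getD (batch : List String) (hnd : batch.Nodup) (longLabel : String)
    (d : PySem.Dict String (List String)) (x : String) :
    (batch.foldl (fun d s => d.modify s [] (fun v => v ++ [longLabel])) d).getD x []
      = if x ∈ batch then d.getD x [] ++ [longLabel] else d.getD x [] := by
  have hmap : batch.foldl (fun d s => d.modify s [] (fun v => v ++ [longLabel])) d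
      = (batch.map (fun s => (s, longLabel))).foldl
          (fun d p => d.modify p.1 [] (fun v => v ++ [p.2])) d := by
    rw [List.foldl_map]
  rw [hmap, PySem.Dict.getD_foldl_modify_append]
  simp only [List.filter_map, List.map_map, Function.comp_def]
  rw [List.filter_beq]
  by_cases hx : x ∈ batch
  · rw [if_pos hx, List.count_eq_one_of_mem hnd hx]
    simp
  · rw [if_neg hx, List.count_eq_zero_of_not_mem hx]
    simp

theorem inner_contains (batch : List String) (longLabel : String)
    (d : PySem.Dict String (List String)) (x : String) :
    (batch.foldl (fun d s => d.modify s [] (fun v => v ++ [longLabel])) d).contains x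
      = (decide (x ∈ batch) || d.contains x) := by
  have hkeys : (batch.foldl (fun d s => d.modify s [] (fun v => v ++ [longLabel])) d).keys
      = PySem.Set.update d.keys batch :=
    PySem.Dict.keys_foldl_modify batch [] (fun _ _ => (fun v => v ++ [longLabel])) d
  have hmem : x ∈ PySem.Set.update d.keys batch ↔ x ∈ d.keys ∨ x ∈ batch := by
    rw [PySem.Set.update_eq_append_filter]
    simp only [List.mem_append, List.mem_filter, PySem.Set.mem_ofList, Bool.not_eq_eq_eq_not,
      Bool.not_true, PySem.Set.contains_eq_listContains]
    constructor
    · rintro (h | ⟨h, _⟩)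
      · exact Or.inl h
      · exact Or.inr h
    · rintro (h | h)
      · exact Or.inl h
      · by_cases hk : x ∈ d.keys
        · exact Or.inl hk
        · exact Or.inr ⟨h, by simpa using hk⟩
  have hiff : (batch.foldl (fun d s => d.modify s [] (fun v => v ++ [longLabel])) d).contains x = true
      ↔ x ∈ d.keys ∨ x ∈ batch := by
    rw [PySem.Dict.contains_iff_mem_keys, hkeys, hmem]
  rw [Bool.eq_iff_iff, hiff]
  simp [← PySem.Dict.contains_iff_mem_keys, or_comm]

-- the whole index fold, looked up afterwards
theorem idx_getD (l : List String) :
    ∀ (d : PySem.Dict String (List String)) (x : String),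
    (l.foldl bStep d).getD x [] = d.getD x [] ++ l.filter (qLbl x) := by
  induction l with
  | nil => intro d x; simp
  | cons t l ih =>
    intro d x
    rw [List.foldl_cons, ih]
    show (bStep d t).getD x [] ++ _ = _
    unfold bStep
    rw [inner_getD _ (PySem.Set.nodup_ofList _) _ _ _, List.filter_cons]
    by_cases h : qLbl x t = true
    · rw [if_pos ((PySem.Set.mem_ofList _ _).mpr ((mem_properSubs x t).mpr h)), if_pos h]
      simp
    · rw [if_neg (fun hc => h ((mem_properSubs x t).mp ((PySem.Set.mem_ofList _ _).mp hc))),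
        if_neg (by simpa using h)]

theorem idx_contains (l : List String) :
    ∀ (d : PySem.Dict String (List String)) (x : String),
    (l.foldl bStep d).contains x = (d.contains x || l.any (qLbl x)) := by
  induction l with
  | nil => intro d x; simp
  | cons t l ih =>
    intro d x
    rw [List.foldl_cons, ih]
    show ((bStep d t).contains x || _) = _
    unfold bStep
    rw [inner_contains, List.any_cons]
    by_cases h : qLbl x t = true
    · rw [decide_eq_true ((PySem.Set.mem_ofList _ _).mpr ((mem_properSubs x t).mpr h))]
      simp [h]
    · rw [decide_eq_false (fun hc => h ((mem_properSubs x t).mp ((PySem.Set.mem_ofList _ _).mp hc)))]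
      rw [Bool.not_eq_true] at h
      simp [h]

-- inserting a key's own current value changes nothing (keys Nodup)
theorem map_overwrite_id {κ ν : Type} [BEq κ] [LawfulBEq κ] (k : κ) (v : ν) :
    ∀ (l : List (κ × ν)), (l.map Prod.fst).Nodup →
    (PySem.Dict.mk l).get? k = some v →
    l.map (fun p => if p.1 == k then (k, v) else p) = l := by
  intro l
  induction l with
  | nil => intro _ hg; simp [PySem.Dict.get?] at hg
  | cons a l ih =>
    intro hnd hg
    obtain ⟨a1, a2⟩ := a
    rw [List.map_cons] at hnd
    rw [PySem.Dict.get?_mk_cons] at hg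
    by_cases he : a1 = k
    · subst he
      have hv : a2 = v := by simpa using hg
      subst hv
      have hni : a1 ∉ l.map Prod.fst := (List.nodup_cons.mp hnd).1
      have hrest : l.map (fun p => if p.1 == a1 then (a1, a2) else p) = l := by
        refine (List.map_congr_left ?_).trans (List.map_id l)
        intro p hp
        have hne : p.1 ≠ a1 := fun hc => hni (hc ▸ List.mem_map_of_mem hp)
        simp [hne]
      simp [hrest]
    · have hne : (a1 == k) = false := beq_eq_false_iff_ne.mpr he
      rw [hne] at hg
      simp only [Bool.false_eq_true, if_false] at hg
      simp [hne, ih (List.nodup_cons.mp hnd).2 hg]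

theorem insert_self_of_get? {κ ν : Type} [BEq κ] [LawfulBEq κ]
    (d : PySem.Dict κ ν) (k : κ) (v : ν)
    (hnd : d.keys.Nodup) (hg : d.get? k = some v) : d.insert k v = d := by
  have hc : d.contains k = true := by
    cases hcc : d.contains k
    · exact absurd hg (by rw [(PySem.Dict.get?_eq_none_iff_contains d k).mpr hcc]; simp)
    · rfl
  apply PySem.Dict.ext
  rw [PySem.Dict.items_insert_of_contains d v hc]
  exact map_overwrite_id k v d.items hnd hg

-- the skip-if-present fold equals the overwrite fold, given every present key
-- already stores its final value
theorem skip_fold (S : List String) :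
    ∀ (l : List String) (r : PySem.Dict String (List String)),
    r.keys.Nodup →
    (∀ k, r.contains k = true → r.get? k = some (S.filter (qLbl k))) →
    l.foldl (fun r s => if S.any (qLbl s) && !r.contains s
        then r.insert s (S.filter (qLbl s)) else r) r
      = l.foldl (fun r s => if S.any (qLbl s)
        then r.insert s (S.filter (qLbl s)) else r) r := by
  intro l
  induction l with
  | nil => intro r _ _; rfl
  | cons s l ih =>
    intro r hnd hinv
    rw [List.foldl_cons, List.foldl_cons]
    by_cases ha : S.any (qLbl s) = true
    · by_cases hc : r.contains s = true
      · rw [if_neg (by simp [ha, hc]), if_pos ha,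
          insert_self_of_get? r s _ hnd (hinv s hc)]
        exact ih r hnd hinv
      · rw [if_pos (by simp [ha, hc]), if_pos ha]
        refine ih _ (PySem.Dict.nodup_keys_insert r s _ hnd) ?_
        intro k hk
        by_cases he : k = s
        · subst he; rw [PySem.Dict.get?_insert_self]
        · rw [PySem.Dict.get?_insert_of_ne _ _ he]
          refine hinv k ?_
          rw [PySem.Dict.contains_insert] at hk
          simpa [he] using hk
    · rw [if_neg (by simp [ha]), if_neg ha]
      exact ih r hnd hinv

theorem B_eq_canon (labels : List String) :
    find_substring_problems_alt labels
      = (canonD (PySem.List.sorted labels (fun l => PySem.Str.len l) false)).items := by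
  unfold find_substring_problems_alt canonD
  dsimp only
  set S := PySem.List.sorted labels (fun l => PySem.Str.len l) false with hS
  congr 1
  have hidx : S.foldl
      (fun (d : PySem.Dict String (List String)) t =>
        (PySem.Set.ofList (properSubs t)).foldl
          (fun d sub => d.modify sub [] (fun v => v ++ [t])) d)
      PySem.Dict.empty = S.foldl bStep PySem.Dict.empty := rfl
  rw [hidx]
  rw [PySem.List.foldl_congr_mem (g := fun (r : PySem.Dict String (List String)) s =>
        if S.any (qLbl s) && !r.contains s then r.insert s (S.filter (qLbl s)) else r)]
  · rw [skip_fold S S PySem.Dict.empty (by simp) (by intro k hk; simp at hk)]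
  · intro acc s _
    rw [idx_contains S PySem.Dict.empty s, idx_getD S PySem.Dict.empty s]
    simp

-- ===== VERDICT (by name: the statement is the Claim_ definition above) =====
theorem find_substring_problems_spec : Claim_equal_find_substring_problems := by
  intro labels _
  unfold Spec_find_substring_problems
  rw [A_eq_canon, B_eq_canon]
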